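-- pv_equiv track=rewrite | github.com/eurostat/multimno | multimno/core/quadkey_utils.py | quadkey_to_tile
-- ===== SOURCE A (Python) =====
-- from typing import List, Tuple
--
-- def quadkey_to_tile(quadkey: str) -> Tuple[int, int, int]:
--     """
--     Converts a quadkey to tile coordinates and zoom level.
--
--     This function takes a quadkey and converts it to tile coordinates (tile_x, tile_y) and zoom level.
--     A quadkey is a string of digits that represents a specific tile in a quadtree-based spatial index.
--
--     Args:
--         quadkey (str): The quadkey to convert.
--
--     Returns:
--         tuple: A tuple representing the tile coordinates and zoom level of the quadkey. The tuple contains three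
--         elements: (tile_x, tile_y, zoom_level).
--
--     Raises:
--         ValueError: If the quadkey contains an invalid character.
--     """
--     tile_x = tile_y = 0
--     zoom_level = len(quadkey)
--     for i in range(zoom_level):
--         bit = zoom_level - i - 1
--         mask = 1 << bit
--         if quadkey[i] == "0":
--             pass
--         elif quadkey[i] == "1":
--             tile_x |= mask
--         elif quadkey[i] == "2":
--             tile_y |= mask
--         elif quadkey[i] == "3":
--             tile_x |= mask
--             tile_y |= mask
--         else:
--             raise ValueError("Invalid quadkey character.")
--     return tile_x, tile_y, zoom_level
-- ===== SOURCE B (Python) =====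
-- def quadkey_to_tile(quadkey: str):
--     # Phase 1: fold the quadkey into a single base-4 integer (Horner, left to right).
--     v = 0
--     for ch in quadkey:
--         if ch not in "0123":
--             raise ValueError("Invalid quadkey character.")
--         v = 4 * v + (ord(ch) - 48)
--     # Phase 2: peel base-4 digits off the right end and deinterleave them
--     # arithmetically into the x/y coordinates.
--     tile_x = tile_y = 0
--     p = 1
--     for _ in range(len(quadkey)):
--         v, d = divmod(v, 4)
--         tile_x += (d % 2) * p
--         tile_y += (d // 2) * p
--         p *= 2
--     return tile_x, tile_y, len(quadkey)
-- ===== Notes on version B (the rewrite author's own statement) =====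
-- stated objective: alternative
-- what changed: A sets bits of tile_x/tile_y one mask at a time while scanning the quadkey; B first folds the quadkey into a single base-4 integer (Horner) and then deinterleaves its digits arithmetically with divmod from the least-significant end.
import Mathlib
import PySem

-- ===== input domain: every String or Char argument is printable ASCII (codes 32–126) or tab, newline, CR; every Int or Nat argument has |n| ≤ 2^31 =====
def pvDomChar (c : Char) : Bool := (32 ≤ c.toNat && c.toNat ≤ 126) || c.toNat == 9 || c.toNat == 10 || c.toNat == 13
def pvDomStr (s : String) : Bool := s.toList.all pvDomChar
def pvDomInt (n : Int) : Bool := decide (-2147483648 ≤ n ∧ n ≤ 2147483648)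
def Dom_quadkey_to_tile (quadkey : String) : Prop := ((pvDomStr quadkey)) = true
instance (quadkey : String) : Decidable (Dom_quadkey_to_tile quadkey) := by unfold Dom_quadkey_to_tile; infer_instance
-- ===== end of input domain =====

-- B replaces A's per-character bit-mask ORing with a two-phase scheme: fold the quadkey into one
-- base-4 integer, then deinterleave its digits arithmetically (divmod) from the right (alternative
-- decomposition, same asymptotic cost).


-- ===== PORT A =====
-- A-side helper: the body of A's `for i in range(zoom_level)` loop; `none` marks the ValueError path.
def aStep (quadkey : String) (zoom : Int) (st : Option (Int × Int)) (i : Int) : Option (Int × Int) :=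
  match st with
  | none => none
  | some (tile_x, tile_y) =>
    let bit := zoom - i - 1
    let mask : Int := (1 : Int) <<< bit.toNat  -- 1 << bit; exact since bit ≥ 0 throughout the loop
    match PySem.Str.pyGet? quadkey i with
    | none => none
    | some c =>
      if c = '0' then some (tile_x, tile_y)
      else if c = '1' then some (PySem.Int.bor tile_x mask, tile_y)
      else if c = '2' then some (tile_x, PySem.Int.bor tile_y mask)
      else if c = '3' then some (PySem.Int.bor tile_x mask, PySem.Int.bor tile_y mask)
      else none  -- raise ValueError("Invalid quadkey character.")

def quadkey_to_tile (quadkey : String) : Int × Int × Int :=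
  let zoom_level : Int := PySem.Str.len quadkey
  match (PySem.List.pyRange 0 zoom_level 1).foldl (aStep quadkey zoom_level) (some (0, 0)) with
  | some (tile_x, tile_y) => (tile_x, tile_y, zoom_level)
  | none => (0, 0, zoom_level)  -- unreachable under Pre_: Python raises ValueError here

-- ===== PORT B =====
-- B-side helper: body of phase 1 (`v = 4*v + (ord(ch) - 48)`, guarded); `none` marks the ValueError path.
def bParseStep (v? : Option Int) (ch : Char) : Option Int :=
  match v? with
  | none => none
  | some v =>
    if (['0', '1', '2', '3'].contains ch) = false then none  -- `ch not in "0123"` (single char: membership): raise ValueError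
    else some (4 * v + ((ch.toNat : Int) - 48))

-- B-side helper: body of phase 2 (one `divmod` peel); state is (tile_x, tile_y, v, p).
def bPeel (st : Int × Int × Int × Int) : Int × Int × Int × Int :=
  let d := PySem.Int.mod st.2.2.1 4
  (st.1 + PySem.Int.mod d 2 * st.2.2.2,
   st.2.1 + PySem.Int.floordiv d 2 * st.2.2.2,
   PySem.Int.floordiv st.2.2.1 4,
   st.2.2.2 * 2)

def quadkey_to_tile_alt (quadkey : String) : Int × Int × Int :=
  match quadkey.toList.foldl bParseStep (some 0) with
  | none => (0, 0, PySem.Str.len quadkey)  -- unreachable under Pre_: Python raises ValueError here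
  | some v =>
    let st := (PySem.List.pyRange 0 (PySem.Str.len quadkey) 1).foldl (fun st _ => bPeel st) (0, 0, v, 1)
    (st.1, st.2.1, PySem.Str.len quadkey)

-- ===== PRECONDITION & SPEC =====
-- Pre_ excludes exactly the quadkeys containing a character other than the four quadkey digits 0-3: A raises ValueError there (and so does B).
def Pre_quadkey_to_tile (quadkey : String) : Prop :=
  (quadkey.toList.all (fun c => (['0', '1', '2', '3'] : List Char).contains c)) = true
instance (quadkey : String) : Decidable (Pre_quadkey_to_tile quadkey) := by
  unfold Pre_quadkey_to_tile; infer_instance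

def pvWitness_quadkey_to_tile : String := "3201"

def Spec_quadkey_to_tile (quadkey : String) (out : Int × Int × Int) : Prop := out = quadkey_to_tile_alt quadkey
instance (quadkey : String) (out : Int × Int × Int) : Decidable (Spec_quadkey_to_tile quadkey out) := by unfold Spec_quadkey_to_tile; infer_instance

-- ===== CLAIM (what is proved, stated in full; the proofs are below) =====
def Claim_equal_quadkey_to_tile : Prop := ∀ (quadkey : String), Dom_quadkey_to_tile quadkey → Pre_quadkey_to_tile quadkey → Spec_quadkey_to_tile quadkey (quadkey_to_tile quadkey)

-- ===== LEMMAS AND PROOFS =====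

-- digit values of a quadkey character
def dX (c : Char) : Int := if c = '1' ∨ c = '3' then 1 else 0
def dY (c : Char) : Int := if c = '2' ∨ c = '3' then 1 else 0

-- Horner (base 2) values of the two coordinate bit strings, and the base-4 value of the quadkey.
def hornX (cs : List Char) : Int := cs.foldl (fun a c => 2 * a + dX c) 0
def hornY (cs : List Char) : Int := cs.foldl (fun a c => 2 * a + dY c) 0
def val4 (cs : List Char) : Int := cs.foldl (fun a c => 4 * a + ((c.toNat : Int) - 48)) 0

theorem horner_init (dv : Char → Int) (cs : List Char) (a : Int) :
    cs.foldl (fun s c => 2 * s + dv c) a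
      = a * 2 ^ cs.length + cs.foldl (fun s c => 2 * s + dv c) 0 := by
  induction cs generalizing a with
  | nil => simp
  | cons c cs ih =>
    simp only [List.foldl_cons, List.length_cons]
    rw [ih (2*a + dv c), ih (2*0 + dv c)]
    ring

theorem hornX_cons (c : Char) (cs : List Char) :
    hornX (c :: cs) = dX c * 2 ^ cs.length + hornX cs := by
  simp only [hornX, List.foldl_cons]
  rw [horner_init dX cs (2*0 + dX c)]; ring

theorem hornY_cons (c : Char) (cs : List Char) :
    hornY (c :: cs) = dY c * 2 ^ cs.length + hornY cs := by
  simp only [hornY, List.foldl_cons]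
  rw [horner_init dY cs (2*0 + dY c)]; ring

-- disjoint OR is addition
theorem nat_or_pow (k t : ℕ) : (2^(k+1)*t) ||| 2^k = 2^(k+1)*t + 2^k := by
  induction k generalizing t with
  | zero =>
    have h := Nat.lor_bit false t true 0
    simp [Nat.bit] at h
    simp [h]
  | succ k ih =>
    have h := Nat.lor_bit false (2^(k+1)*t) false (2^k)
    simp [Nat.bit] at h
    have e1 : 2^(k+1+1)*t = 2*(2^(k+1)*t) := by ring
    have e2 : (2:ℕ)^(k+1) = 2*2^k := by ring
    calc 2^(k+1+1)*t ||| 2^(k+1) = 2*(2^(k+1)*t) ||| 2*2^k := by rw [e1, e2]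
    _ = 2*(2^(k+1)*t ||| 2^k) := h
    _ = 2*(2^(k+1)*t + 2^k) := by rw [ih]
    _ = 2^(k+1+1)*t + 2^(k+1) := by ring

theorem bor_pow_add (x : Int) (k : ℕ) (hx : 0 ≤ x) (hdvd : (2 : Int) ^ (k + 1) ∣ x) :
    PySem.Int.bor x (2 ^ k) = x + 2 ^ k := by
  have h2 : (0:Int) ≤ 2^k := by positivity
  rw [PySem.Int.bor_of_nonneg hx h2]
  have hxeq : x = (x.toNat : Int) := (Int.toNat_of_nonneg hx).symm
  have hdn : 2^(k+1) ∣ x.toNat := by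
    rw [← Int.natCast_dvd_natCast]
    push_cast
    rw [← hxeq]
    exact hdvd
  have hmul : 2^(k+1) * (x.toNat / 2^(k+1)) = x.toNat := Nat.mul_div_cancel' hdn
  have hor := nat_or_pow k (x.toNat / 2^(k+1))
  rw [hmul] at hor
  have htn : ((2:Int)^k).toNat = 2^k := by
    rw [show ((2:Int)^k) = ((2^k:ℕ):Int) by push_cast; ring, Int.toNat_natCast]
  rw [htn, hor]
  push_cast
  rw [← hxeq]

-- A's loop, generalized over the start index with the divisibility invariant.
theorem aLoop (q : String) (hval : ∀ c ∈ q.toList, c ∈ (['0', '1', '2', '3'] : List Char)) :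
    ∀ (k i : ℕ), i + k = q.toList.length →
      ∀ (x y : Int), 0 ≤ x → 0 ≤ y →
        (2 : Int) ^ k ∣ x → (2 : Int) ^ k ∣ y →
        (PySem.List.pyRange (i : Int) (q.toList.length : Int) 1).foldl
            (aStep q (q.toList.length : Int)) (some (x, y))
          = some (x + hornX (q.toList.drop i), y + hornY (q.toList.drop i)) := by
  intro k
  induction k with
  | zero =>
    intro i hi x y hx hy _ _
    rw [PySem.List.pyRange_one_eq_nil (by omega : (q.toList.length:Int) ≤ i)]
    simp [List.drop_of_length_le (by omega : q.toList.length ≤ i), hornX, hornY]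
  | succ k ih =>
    intro i hi x y hx hy hdx hdy
    have hilt : i < q.toList.length := by omega
    rw [PySem.List.pyRange_one_cons (by exact_mod_cast hilt)]
    rw [List.foldl_cons]
    have hget : PySem.Str.pyGet? q (i : Int) = some (q.toList[i]'hilt) := by
      simp [pysem]
    set c := q.toList[i]'hilt with hc
    clear_value c
    have hcmem : c ∈ (['0','1','2','3'] : List Char) := hval c (hc ▸ List.getElem_mem hilt)
    have hbit : ((q.toList.length : Int) - i - 1).toNat = k := by omega
    have hmask : (1 : Int) <<< (((q.toList.length : Int) - i - 1).toNat) = 2 ^ k := by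
      rw [hbit, Int.shiftLeft_eq]; ring
    have hdrop : q.toList.drop i = c :: q.toList.drop (i+1) :=
      hc ▸ List.drop_eq_getElem_cons hilt
    have hlenrest : (q.toList.drop (i+1)).length = k := by
      rw [List.length_drop]; omega
    have hsucc : ((i:Int) + 1) = ((i+1 : ℕ) : Int) := by push_cast; ring
    have hdvd2 : ∀ z : Int, (2:Int)^(k+1) ∣ z → (2:Int)^k ∣ (z + 2^k) + 2^k := by
      intro z hz
      have : (z + 2^k) + 2^k = z + 2^(k+1) := by ring
      rw [this]
      exact dvd_add (dvd_trans (pow_dvd_pow 2 (by omega)) hz) (pow_dvd_pow 2 (by omega))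
    have step : aStep q (q.toList.length : Int) (some (x, y)) (i : Int)
        = some (x + dX c * 2^k, y + dY c * 2^k) := by
      have hc4 : c = '0' ∨ c = '1' ∨ c = '2' ∨ c = '3' := by simpa using hcmem
      simp only [aStep, hget, hmask]
      rcases hc4 with h | h | h | h <;> subst h <;>
        simp [dX, dY, bor_pow_add _ k hx hdx, bor_pow_add _ k hy hdy]
    rw [step, hsucc]
    rw [ih (i+1) (by omega) (x + dX c * 2^k) (y + dY c * 2^k)
      (by have : (0:Int) ≤ dX c := by unfold dX; split <;> norm_num
          positivity)
      (by have : (0:Int) ≤ dY c := by unfold dY; split <;> norm_num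
          positivity)
      (by unfold dX; split
          · simpa using hdvd2 x (by simpa using hdx)
          · simpa using dvd_trans (pow_dvd_pow 2 (by omega : k ≤ k+1)) hdx)
      (by unfold dY; split
          · simpa using hdvd2 y (by simpa using hdy)
          · simpa using dvd_trans (pow_dvd_pow 2 (by omega : k ≤ k+1)) hdy)]
    rw [hdrop, hornX_cons, hornY_cons, hlenrest]
    simp only [Option.some.injEq, Prod.mk.injEq]
    constructor <;> ring

-- constant-body foldl is iteration
theorem foldl_const {α β : Type} (g : β → β) (l : List α) (st : β) :
    l.foldl (fun s _ => g s) st = g^[l.length] st := by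
  induction l generalizing st with
  | nil => simp
  | cons a l ih => simp [List.foldl_cons, ih, Function.iterate_succ_apply]

-- B's phase-1 loop parses a valid quadkey to its base-4 value.
theorem bParse (cs : List Char) (hval : ∀ c ∈ cs, c ∈ (['0', '1', '2', '3'] : List Char)) :
    ∀ v : Int, cs.foldl bParseStep (some v)
      = some (cs.foldl (fun a c => 4 * a + ((c.toNat : Int) - 48)) v) := by
  induction cs with
  | nil => simp
  | cons c cs ih =>
    intro v
    have hc : c ∈ (['0','1','2','3'] : List Char) := hval c (by simp)
    have hcn : (['0','1','2','3'] : List Char).contains c = true := by simpa using hc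
    simp only [List.foldl_cons, bParseStep, hcn]
    exact ih (fun c hm => hval c (by simp [hm])) _

-- one divmod peel of 4*v + e for a digit value 0 ≤ e < 4
theorem peel_step (v p x y e : Int) (he0 : 0 ≤ e) (he4 : e < 4) :
    bPeel (x, y, 4 * v + e, p)
      = (x + PySem.Int.mod e 2 * p, y + PySem.Int.floordiv e 2 * p, v, p * 2) := by
  have hd : PySem.Int.mod (4 * v + e) 4 = e := by
    simp only [PySem.Int.mod]
    rw [Int.fmod_eq_emod_of_nonneg _ (by norm_num)]
    omega
  have hq : PySem.Int.floordiv (4 * v + e) 4 = v := by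
    simp only [PySem.Int.floordiv]
    rw [Int.fdiv_eq_ediv_of_nonneg _ (by norm_num)]
    omega
  simp only [bPeel, hd, hq]

-- B's phase-2 loop deinterleaves the base-4 value.
theorem bLoop (cs : List Char) (hval : ∀ c ∈ cs, c ∈ (['0', '1', '2', '3'] : List Char)) :
    ∀ (x y p : Int),
      bPeel^[cs.length] (x, y, val4 cs, p)
        = (x + p * hornX cs, y + p * hornY cs, 0, p * 2 ^ cs.length) := by
  induction cs using List.reverseRecOn with
  | nil => intro x y p; simp [val4, hornX, hornY]
  | append_singleton ds c ih =>
    intro x y p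
    have hc : c = '0' ∨ c = '1' ∨ c = '2' ∨ c = '3' := by
      have := hval c (by simp); simpa using this
    have hval' : ∀ c ∈ ds, c ∈ (['0','1','2','3'] : List Char) :=
      fun c hm => hval c (by simp [hm])
    have hv4 : val4 (ds ++ [c]) = 4 * val4 ds + ((c.toNat : Int) - 48) := by
      simp [val4, List.foldl_append]
    have hhx : hornX (ds ++ [c]) = 2 * hornX ds + dX c := by
      simp [hornX, List.foldl_append]
    have hhy : hornY (ds ++ [c]) = 2 * hornY ds + dY c := by
      simp [hornY, List.foldl_append]
    have hstep : bPeel (x, y, val4 (ds ++ [c]), p) = (x + dX c * p, y + dY c * p, val4 ds, p * 2) := by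
      rw [hv4]
      rcases hc with h | h | h | h <;> subst h <;>
        rw [peel_step _ _ _ _ _ (by decide) (by decide)] <;>
        norm_num [show PySem.Int.mod (('0'.toNat:Int) - 48) 2 = 0 from by decide,
          show PySem.Int.mod (('1'.toNat:Int) - 48) 2 = 1 from by decide,
          show PySem.Int.mod (('2'.toNat:Int) - 48) 2 = 0 from by decide,
          show PySem.Int.mod (('3'.toNat:Int) - 48) 2 = 1 from by decide,
          show PySem.Int.floordiv (('0'.toNat:Int) - 48) 2 = 0 from by decide,
          show PySem.Int.floordiv (('1'.toNat:Int) - 48) 2 = 0 from by decide,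
          show PySem.Int.floordiv (('2'.toNat:Int) - 48) 2 = 1 from by decide,
          show PySem.Int.floordiv (('3'.toNat:Int) - 48) 2 = 1 from by decide,
          show dX '0' = 0 from by decide, show dX '1' = 1 from by decide,
          show dX '2' = 0 from by decide, show dX '3' = 1 from by decide,
          show dY '0' = 0 from by decide, show dY '1' = 0 from by decide,
          show dY '2' = 1 from by decide, show dY '3' = 1 from by decide,
          show '0'.toNat = 48 from rfl, show '1'.toNat = 49 from rfl,
          show '2'.toNat = 50 from rfl, show '3'.toNat = 51 from rfl]
    rw [show (ds ++ [c]).length = ds.length + 1 by simp, Function.iterate_succ_apply, hstep,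
      ih hval' _ _ (p * 2), hhx, hhy]
    refine Prod.ext ?_ (Prod.ext ?_ (Prod.ext ?_ ?_)) <;> simp <;> ring

-- the two ports both compute (hornX, hornY, length)
theorem a_eval (q : String) (hval : ∀ c ∈ q.toList, c ∈ (['0', '1', '2', '3'] : List Char)) :
    quadkey_to_tile q = (hornX q.toList, hornY q.toList, (q.toList.length : Int)) := by
  have h := aLoop q hval q.toList.length 0 (by omega) 0 0 le_rfl le_rfl (dvd_zero _) (dvd_zero _)
  simp only [Nat.cast_zero, List.drop_zero, zero_add] at h
  simp only [quadkey_to_tile, PySem.Str.len_eq, h]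

theorem b_eval (q : String) (hval : ∀ c ∈ q.toList, c ∈ (['0', '1', '2', '3'] : List Char)) :
    quadkey_to_tile_alt q = (hornX q.toList, hornY q.toList, (q.toList.length : Int)) := by
  have hp := bParse q.toList hval 0
  have hv0 : q.toList.foldl (fun a c => 4 * a + ((c.toNat : Int) - 48)) 0 = val4 q.toList := rfl
  rw [hv0] at hp
  have hlen : ((q.toList.length : Int) - 0).toNat = q.toList.length := by omega
  have hfold : (PySem.List.pyRange 0 (PySem.Str.len q) 1).foldl (fun st _ => bPeel st)
      ((0 : Int), (0 : Int), val4 q.toList, (1 : Int)) = bPeel^[q.toList.length] (0, 0, val4 q.toList, 1) := by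
    rw [foldl_const, PySem.List.length_pyRange_one, PySem.Str.len_eq, hlen]
  simp only [quadkey_to_tile_alt, hp]
  rw [hfold, bLoop q.toList hval 0 0 1, PySem.Str.len_eq]
  norm_num

-- ===== VERDICT (by name: the statement is the Claim_ definition above) =====
theorem quadkey_to_tile_spec : Claim_equal_quadkey_to_tile := by
  intro q _ hpre
  have hval : ∀ c ∈ q.toList, c ∈ (['0', '1', '2', '3'] : List Char) := by
    simpa [Pre_quadkey_to_tile, List.all_eq_true] using hpre
  unfold Spec_quadkey_to_tile
  rw [a_eval q hval, b_eval q hval]
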